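-- pv_equiv track=rewrite | github.com/TonyG1998/Connect_four_minmax | Connect_four.py | valid_click
-- ===== SOURCE A (Python) =====
-- def valid_click(pos):
-- 	 x_start = 143
-- 	 click = pos[0]
-- 	 #Diameter of the circle in the gap of the image
-- 	 gap = 14
-- 	 #Check if user clicked in the bounds of the board
-- 	 if((pos[0] < 125) or (pos[0] > 374)):
-- 	 	return False
-- 	 if((pos[1] < 100) or (pos[1] > 300)):
-- 	 	return False
-- 	 #Check each gap
-- 	 for i in range (0, 7):
-- 	 	if (click > (x_start - gap) and (click < x_start + gap)):
-- 	 		return True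
-- 	 	x_start += 36
--
-- 	 return False
-- ===== SOURCE B (Python) =====
-- def valid_click(pos):
--     # same bounding-box guards, then a closed-form nearest-gap-center check
--     if pos[0] < 125 or pos[0] > 374:
--         return False
--     if pos[1] < 100 or pos[1] > 300:
--         return False
--     k = (pos[0] - 143 + 18) // 36  # index of nearest gap center 143 + 36*k
--     return 0 <= k <= 6 and abs(pos[0] - (143 + 36 * k)) < 14
-- ===== Notes on version B (the rewrite author's own statement) =====
-- stated objective: simpler
-- what changed: Replaced the 7-iteration gap scan (accumulating x_start) with a closed-form computation of the single nearest gap center index via floor division and one distance check.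
import Mathlib
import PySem

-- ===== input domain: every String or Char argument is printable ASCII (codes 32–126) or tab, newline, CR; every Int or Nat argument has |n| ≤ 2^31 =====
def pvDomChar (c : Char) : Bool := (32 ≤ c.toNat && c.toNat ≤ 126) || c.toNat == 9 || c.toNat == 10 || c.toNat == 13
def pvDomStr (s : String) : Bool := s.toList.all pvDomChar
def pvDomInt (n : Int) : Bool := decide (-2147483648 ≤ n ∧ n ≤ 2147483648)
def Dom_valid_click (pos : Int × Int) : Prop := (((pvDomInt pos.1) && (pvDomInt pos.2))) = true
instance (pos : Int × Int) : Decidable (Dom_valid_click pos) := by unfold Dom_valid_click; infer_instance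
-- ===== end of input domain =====

-- B replaces A's 7-step gap scan by a closed-form nearest-gap-center check (simpler, same values).

-- ===== PORT A =====
-- A's 'for i in range(0,7)' loop with early return; fuel = remaining iterations,
-- x_start advances by 36 each step exactly as in the Python.
def valid_click_loop (click x_start : Int) : Nat → Bool
  | 0 => false
  | n + 1 =>
    if click > x_start - 14 ∧ click < x_start + 14 then true
    else valid_click_loop click (x_start + 36) n

def valid_click (pos : Int × Int) : Bool :=
  let x_start : Int := 143
  let click := pos.1
  if pos.1 < 125 ∨ pos.1 > 374 then false
  else if pos.2 < 100 ∨ pos.2 > 300 then false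
  else valid_click_loop click x_start 7

-- ===== PORT B =====
def valid_click_alt (pos : Int × Int) : Bool :=
  if pos.1 < 125 ∨ pos.1 > 374 then false
  else if pos.2 < 100 ∨ pos.2 > 300 then false
  else
    let k := PySem.Int.floordiv (pos.1 - 143 + 18) 36
    decide (0 ≤ k ∧ k ≤ 6 ∧ (pos.1 - (143 + 36 * k)).natAbs < 14)

-- ===== PRECONDITION & SPEC =====
def Spec_valid_click (pos : Int × Int) (out : Bool) : Prop := out = valid_click_alt pos
instance (pos : Int × Int) (out : Bool) : Decidable (Spec_valid_click pos out) := by unfold Spec_valid_click; infer_instance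

-- ===== CLAIM (what is proved, stated in full; the proofs are below) =====
def Claim_equal_valid_click : Prop := ∀ (pos : Int × Int), Dom_valid_click pos → Spec_valid_click pos (valid_click pos)

-- ===== LEMMAS AND PROOFS =====
theorem valid_click_key (x y : Int) : valid_click (x, y) = valid_click_alt (x, y) := by
  unfold valid_click valid_click_alt
  rw [PySem.Int.floordiv_eq_ediv_of_pos (by omega)]
  simp only [valid_click_loop]
  split_ifs <;> (symm; simp only [decide_eq_true_eq, decide_eq_false_iff_not]) <;> omega

-- ===== VERDICT (by name: the statement is the Claim_ definition above) =====
theorem valid_click_spec : Claim_equal_valid_click := by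
  intro ⟨x, y⟩ _
  exact valid_click_key x y
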